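-- pv_equiv track=rewrite | github.com/IsaacG/coding-puzzles | CodingQuest.io/2022-practice-01/IsaacG.py | solve
-- ===== SOURCE A (Python) =====
-- def solve(data: str) -> int:
--     """Solve which player wins and when."""
--     board_data = [line for line in data.splitlines() if len(line.split()) > 2]
--     dice_data = [line for line in data.splitlines() if len(line.split()) == 2]
--     board = []
--     for idx, line in enumerate(reversed(board_data)):
--         nums = [int(i) for i in line.split()]
--         if idx % 2:
--             nums.reverse()
--         board.extend(nums)
--     end = len(board) - 1
--
--     position = {1: 0, 2: 0}
--     for moves, line in enumerate(dice_data, start=1):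
--         for player, roll in enumerate((int(i) for i in line.split()), start=1):
--             while roll != 0:
--                 position[player] += roll
--                 if position[player] >= end:
--                     return player * moves
--                 roll = board[position[player]]
-- ===== SOURCE B (Python) =====
-- def solve(data: str) -> int:
--     """Solve which player wins and when (memoized chain resolution)."""
--     lines = data.splitlines()
--     board = []
--     for idx, line in enumerate(reversed([l for l in lines if len(l.split()) > 2])):
--         nums = [int(i) for i in line.split()]
--         board.extend(nums[::-1] if idx % 2 else nums)
--     end = len(board) - 1
--     cache = {}
--
--     def resolve(s):
--         """Final square reached from s, or None if s wins; memoized."""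
--         path = []
--         while s < end and s not in cache and board[s] != 0:
--             path.append(s)
--             s += board[s]
--         r = None if s >= end else cache.get(s, s)
--         for q in path:
--             cache[q] = r
--         return r
--
--     position = {1: 0, 2: 0}
--     moves = 0
--     for line in (l for l in lines if len(l.split()) == 2):
--         moves += 1
--         for player, roll in enumerate(line.split(), start=1):
--             roll = int(roll)
--             if roll == 0:
--                 continue
--             r = resolve(position[player] + roll)
--             if r is None:
--                 return player * moves
--             position[player] = r
--     return None
-- ===== Notes on version B (the rewrite author's own statement) =====
-- stated objective: alternative
-- what changed: A re-follows every snake/ladder chain square by square inside a while loop on each roll; B resolves each landing square once through a lazy memo cache (dict from square to final square or win), so a repeated landing is a single dict lookup instead of a chain walk.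
-- outside the precondition, e.g. on solve('2 1 -1 0\n3 0'): A returns 1, B returns 1; on solve('0 0 0 0\n3 -9'): A returns 1, B returns 1; on solve('0 0 0\n2 0\nx y'): A returns 1, B returns 1
import Mathlib
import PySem

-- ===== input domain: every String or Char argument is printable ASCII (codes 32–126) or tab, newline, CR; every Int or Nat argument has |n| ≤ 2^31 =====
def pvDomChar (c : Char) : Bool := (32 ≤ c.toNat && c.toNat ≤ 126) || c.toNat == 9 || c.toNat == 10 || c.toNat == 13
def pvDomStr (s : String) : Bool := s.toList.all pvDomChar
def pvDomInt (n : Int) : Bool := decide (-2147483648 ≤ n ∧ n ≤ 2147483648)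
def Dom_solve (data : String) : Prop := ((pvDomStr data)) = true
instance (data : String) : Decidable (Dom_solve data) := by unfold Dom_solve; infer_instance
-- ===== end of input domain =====

-- B replaces A's per-roll while-chain by a memoized chain-resolution cache (one dict lookup per
-- previously-seen landing square).

-- ===== PORT A =====
-- shared parsing helpers: both Pythons contain this identical board-building code
def pvTokInt (s : String) : Int := (PySem.Int.ofStr? s).getD 0  -- int(tok); Pre_ guarantees it parses

def pvBoard (data : String) : List Int :=
  (PySem.List.enumerate
      (((PySem.Str.splitlines data).filter
          (fun l => decide (2 < (PySem.Str.split₀ l).length))).reverse) 0).foldl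
    (fun acc p =>
      let nums := (PySem.Str.split₀ p.2).map pvTokInt
      acc ++ (if p.1 % 2 ≠ 0 then nums.reverse else nums)) []

def pvDice (data : String) : List String :=
  (PySem.Str.splitlines data).filter (fun l => decide ((PySem.Str.split₀ l).length = 2))

-- fuel bound for the chain walks; on Pre_ every chain terminates within this many steps
def pvN (board : List Int) : Nat := 2 * board.length + 2

-- the inner `while roll != 0` loop; `none` = the player crossed the end (wins), `some p` = stops at p.
-- fuel (pvN board + 1) is sufficient on Pre_ (every chain terminates within pvN board steps).
def chainA (board : List Int) (endv : Int) : Nat → Int → Int → Option Int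
  | 0, pos, _ => some pos
  | fuel+1, pos, roll =>
    if roll = 0 then some pos
    else
      let p := pos + roll
      if endv ≤ p then none
      else chainA board endv fuel p (PySem.List.pyGetD board p 0)

-- `for player, roll in enumerate((int(i) for i in line.split()), start=1)`
def playersA (board : List Int) (endv : Int) :
    List (Int × Int) → PySem.Dict Int Int → Sum Int (PySem.Dict Int Int)
  | [], posd => .inr posd
  | pr :: rest, posd =>
    match chainA board endv (pvN board + 1) (posd.getD pr.1 0) pr.2 with
    | none => .inl pr.1
    | some p => playersA board endv rest (posd.insert pr.1 p)

-- `for moves, line in enumerate(dice_data, start=1)`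
def simA (board : List Int) (endv : Int) :
    List String → Int → PySem.Dict Int Int → Option Int
  | [], _, _ => none
  | line :: rest, moves, posd =>
    match playersA board endv
        (PySem.List.enumerate ((PySem.Str.split₀ line).map pvTokInt) 1) posd with
    | .inl player => some (player * moves)
    | .inr posd' => simA board endv rest (moves + 1) posd'

def solve (data : String) : Option Int :=
  let board := pvBoard data
  let endv : Int := (board.length : Int) - 1
  simA board endv (pvDice data) 1 (PySem.Dict.ofList [(1, 0), (2, 0)])

-- ===== PORT B =====
-- the `while s < end and s not in cache and board[s] != 0` walk of resolve; returns (path, final s)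
def chaseB (board : List Int) (endv : Int) :
    Nat → PySem.Dict Int (Option Int) → Int → List Int → List Int × Int
  | 0, _, s, path => (path, s)
  | fuel+1, cache, s, path =>
    if s < endv ∧ cache.contains s = false ∧ PySem.List.pyGetD board s 0 ≠ 0 then
      chaseB board endv fuel cache (s + PySem.List.pyGetD board s 0) (path ++ [s])
    else (path, s)

-- resolve(s): final square (or none = win), plus the updated cache
def resolveB (board : List Int) (endv : Int) (cache : PySem.Dict Int (Option Int)) (s : Int) :
    Option Int × PySem.Dict Int (Option Int) :=
  let pr := chaseB board endv (pvN board + 1) cache s []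
  let r : Option Int := if endv ≤ pr.2 then none else (cache.get? pr.2).getD (some pr.2)
  (r, pr.1.foldl (fun c q => c.insert q r) cache)

-- `for player, roll in enumerate(line.split(), start=1)`
def playersB (board : List Int) (endv : Int) :
    List (Int × String) → PySem.Dict Int Int → PySem.Dict Int (Option Int) →
    Sum Int (PySem.Dict Int Int × PySem.Dict Int (Option Int))
  | [], posd, cache => .inr (posd, cache)
  | pr :: rest, posd, cache =>
    let roll := pvTokInt pr.2
    if roll = 0 then playersB board endv rest posd cache
    else
      match resolveB board endv cache (posd.getD pr.1 0 + roll) with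
      | (none, _) => .inl pr.1
      | (some p, cache') => playersB board endv rest (posd.insert pr.1 p) cache'

def simB (board : List Int) (endv : Int) :
    List String → Int → PySem.Dict Int Int → PySem.Dict Int (Option Int) → Option Int
  | [], _, _, _ => none
  | line :: rest, moves, posd, cache =>
    let moves' := moves + 1
    match playersB board endv (PySem.List.enumerate (PySem.Str.split₀ line) 1) posd cache with
    | .inl player => some (player * moves')
    | .inr (posd', cache') => simB board endv rest moves' posd' cache'

def solve_alt (data : String) : Option Int :=
  let board := pvBoard data
  let endv : Int := (board.length : Int) - 1
  simB board endv (pvDice data) 0 (PySem.Dict.ofList [(1, 0), (2, 0)]) PySem.Dict.empty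

-- ===== PRECONDITION & SPEC =====
-- `chainFine board endv f s = true` iff the snake/ladder chain starting at square s terminates
-- (crosses the end or reaches a zero square) within f steps without ever indexing off the board.
def chainFine (board : List Int) (endv : Int) : Nat → Int → Bool
  | 0, _ => false
  | f+1, s =>
    if endv ≤ s then true
    else
      match PySem.List.pyGet? board s with
      | none => false
      | some v => if v = 0 then true else chainFine board endv f (s + v)

-- every integer appearing on a dice (two-token) line
def pvDiceVals (data : String) : List Int :=
  (pvDice data).flatMap (fun l => (PySem.Str.split₀ l).map pvTokInt)

-- Pre_ excludes inputs where A can raise ValueError (a non-int token on a board or dice line,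
-- including tokens A only reaches if the game runs long enough) or IndexError (a chain step or a
-- dice landing below -len(board)), and boards whose snake/ladder chain graph has a cycle, on which
-- A loops forever; the conditions are quantified over all board squares and dice values, so they
-- also exclude some games A finishes because the offending square or roll is never reached.
def Pre_solve (data : String) : Prop :=
  (∀ line ∈ PySem.Str.splitlines data, 2 ≤ (PySem.Str.split₀ line).length →
      ∀ t ∈ PySem.Str.split₀ line, (PySem.Int.ofStr? t).isSome = true)
  ∧ (∀ k ∈ PySem.List.pyRange (-((pvBoard data).length : Int))
        (((pvBoard data).length : Int) - 1) 1,
      chainFine (pvBoard data) (((pvBoard data).length : Int) - 1) (pvN (pvBoard data)) k = true)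
  ∧ (∀ r ∈ pvDiceVals data,
      (-((pvBoard data).length : Int) ≤ r ∨ ((pvBoard data).length : Int) - 1 ≤ r)
      ∧ ∀ v ∈ PySem.List.pyRange (-((pvBoard data).length : Int))
            (((pvBoard data).length : Int) - 1) 1,
          PySem.List.pyGetD (pvBoard data) v 0 = 0 →
          (-((pvBoard data).length : Int) ≤ v + r ∨ ((pvBoard data).length : Int) - 1 ≤ v + r))

instance (data : String) : Decidable (Pre_solve data) := by unfold Pre_solve; infer_instance

def pvWitness_solve : String := "0 -2 0\n0 0 0\n2 2\n1 3"

def Spec_solve (data : String) (out : Option Int) : Prop := out = solve_alt data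
instance (data : String) (out : Option Int) : Decidable (Spec_solve data out) := by
  unfold Spec_solve; infer_instance

-- ===== CLAIM (what is proved, stated in full; the proofs are below) =====
def Claim_equal_solve : Prop :=
  ∀ (data : String), Dom_solve data → Pre_solve data → Spec_solve data (solve data)

-- ===== LEMMAS AND PROOFS =====

lemma pvN_succ (board : List Int) : pvN board = (2 * board.length + 1) + 1 := rfl

lemma chainFine_end (board : List Int) (endv : Int) (f : Nat) (s : Int) (h : endv ≤ s) :
    chainFine board endv (f+1) s = true := by
  rw [chainFine, if_pos h]

lemma chainFine_succ (board : List Int) (endv : Int) (f : Nat) (s v : Int)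
    (hns : ¬ endv ≤ s) (hg : PySem.List.pyGet? board s = some v) :
    chainFine board endv (f+1) s = if v = 0 then true else chainFine board endv f (s + v) := by
  rw [chainFine, if_neg hns, hg]

-- the chain-following function both programs compute: the outcome of landing on square s
-- (none = crossed the end and wins; some p = the chain stops on square p)
def gSpec (board : List Int) (endv : Int) : Nat → Int → Option Int
  | 0, s => some s
  | f+1, s =>
    if endv ≤ s then none
    else if PySem.List.pyGetD board s 0 = 0 then some s
    else gSpec board endv f (s + PySem.List.pyGetD board s 0)

-- canonical (fuel-adequate) chain outcome
def pvG (board : List Int) (endv : Int) (s : Int) : Option Int :=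
  gSpec board endv (pvN board) s

-- cache invariant of B: every cached entry is the true chain outcome of its key
def pvInv (board : List Int) (endv : Int) (cache : PySem.Dict Int (Option Int)) : Prop :=
  ∀ k v, cache.get? k = some v → v = pvG board endv k

-- a square a player can be resting on
def pvRest (board : List Int) (endv : Int) (v : Int) : Prop :=
  v = 0 ∨ (-(board.length : Int) ≤ v ∧ v < endv ∧ PySem.List.pyGetD board v 0 = 0)

lemma pv_get_some (board : List Int) (endv : Int) (hend : endv = (board.length : Int) - 1)
    (s : Int) (h1 : -(board.length : Int) ≤ s) (h2 : s < endv) :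
    PySem.List.pyGet? board s = some (PySem.List.pyGetD board s 0) := by
  have hin : PySem.Raise.InRange board.length s := by
    simp only [PySem.Raise.InRange]; omega
  rcases h : PySem.List.pyGet? board s with _ | v
  · rw [PySem.List.pyGet?_eq_none_iff] at h; exact absurd hin h
  · have hd : PySem.List.pyGetD board s 0 = v := by
      simp [PySem.List.pyGetD, h]
    rw [hd]

lemma pv_fine_bounds (board : List Int) (endv : Int) (g : Nat) (s : Int)
    (h : chainFine board endv g s = true) (hns : ¬ endv ≤ s) :
    -(board.length : Int) ≤ s ∧ s < endv := by
  cases g with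
  | zero => simp [chainFine] at h
  | succ f =>
    rw [chainFine, if_neg hns] at h
    rcases hg : PySem.List.pyGet? board s with _ | v
    · rw [hg] at h; simp at h
    · have hin : PySem.Raise.InRange board.length s := by
        by_contra hc
        rw [← PySem.List.pyGet?_eq_none_iff] at hc
        rw [hc] at hg; cases hg
      simp only [PySem.Raise.InRange] at hin
      omega

lemma pv_L (board : List Int) (endv : Int) (hend : endv = (board.length : Int) - 1) :
    ∀ (g f : Nat) (p : Int), chainFine board endv g p = true → g ≤ f →
      (if endv ≤ p then none else chainA board endv f p (PySem.List.pyGetD board p 0)) =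
        gSpec board endv g p := by
  intro g
  induction g with
  | zero => intro f p h _; simp [chainFine] at h
  | succ g ih =>
    intro f p h hle
    by_cases hp : endv ≤ p
    · simp [gSpec, hp]
    · have hbnd := pv_fine_bounds board endv (g+1) p h hp
      have hg := pv_get_some board endv hend p hbnd.1 hbnd.2
      rw [chainFine_succ board endv g p _ hp hg] at h
      obtain ⟨f', rfl⟩ : ∃ f', f = f' + 1 := ⟨f - 1, by omega⟩
      by_cases hv : PySem.List.pyGetD board p 0 = 0
      · rw [if_neg hp]
        simp [chainA, hv, gSpec, hp]
      · rw [if_neg hv] at h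
        rw [if_neg hp]
        simp only [chainA, if_neg hv]
        rw [show gSpec board endv (g+1) p =
              gSpec board endv g (p + PySem.List.pyGetD board p 0) from by
            rw [gSpec, if_neg hp, if_neg hv]]
        exact ih f' (p + PySem.List.pyGetD board p 0) h (by omega)

lemma pv_g_stable (board : List Int) (endv : Int) (hend : endv = (board.length : Int) - 1)
    (g1 g2 : Nat) (p : Int)
    (h1 : chainFine board endv g1 p = true) (h2 : chainFine board endv g2 p = true) :
    gSpec board endv g1 p = gSpec board endv g2 p := by
  rw [← pv_L board endv hend g1 (max g1 g2) p h1 (le_max_left _ _),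
      ← pv_L board endv hend g2 (max g1 g2) p h2 (le_max_right _ _)]

lemma pvG_none (board : List Int) (endv : Int) (p : Int) (h : endv ≤ p) :
    pvG board endv p = none := by
  unfold pvG
  rw [pvN_succ, gSpec, if_pos h]

lemma pvG_eq (board : List Int) (endv : Int) (hend : endv = (board.length : Int) - 1)
    (hfine : ∀ k, -(board.length : Int) ≤ k → k < endv →
      chainFine board endv (pvN board) k = true)
    (p : Int) (h1 : -(board.length : Int) ≤ p) (h2 : p < endv) :
    pvG board endv p =
      if PySem.List.pyGetD board p 0 = 0 then some p
      else pvG board endv (p + PySem.List.pyGetD board p 0) := by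
  have hf := hfine p h1 h2
  have hg := pv_get_some board endv hend p h1 h2
  rw [pvN_succ, chainFine_succ board endv _ p _ (not_le.2 h2) hg] at hf
  unfold pvG
  rw [pvN_succ]
  conv_lhs => rw [gSpec]
  rw [if_neg (not_le.2 h2)]
  by_cases hb : PySem.List.pyGetD board p 0 = 0
  · simp [hb]
  · rw [if_neg hb] at hf
    rw [if_neg hb, if_neg hb]
    have h2' : chainFine board endv (2 * board.length + 1 + 1)
        (p + PySem.List.pyGetD board p 0) = true := by
      by_cases hpe : endv ≤ p + PySem.List.pyGetD board p 0
      · exact chainFine_end board endv _ _ hpe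
      · have hbnd := pv_fine_bounds board endv _ _ hf hpe
        have := hfine _ hbnd.1 hbnd.2
        rwa [pvN_succ] at this
    exact pv_g_stable board endv hend _ _ _ hf h2'

lemma pv_gspec_rest (board : List Int) (endv : Int) (hend : endv = (board.length : Int) - 1) :
    ∀ (g : Nat) (p q : Int), chainFine board endv g p = true →
      -(board.length : Int) ≤ p → p < endv → gSpec board endv g p = some q →
      -(board.length : Int) ≤ q ∧ q < endv ∧ PySem.List.pyGetD board q 0 = 0 := by
  intro g
  induction g with
  | zero => intro p q h _ _ _; simp [chainFine] at h
  | succ g ih =>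
    intro p q h hp1 hp2 hq
    have hg := pv_get_some board endv hend p hp1 hp2
    rw [chainFine_succ board endv g p _ (not_le.2 hp2) hg] at h
    rw [gSpec, if_neg (not_le.2 hp2)] at hq
    by_cases hv : PySem.List.pyGetD board p 0 = 0
    · rw [if_pos hv] at hq
      cases hq
      exact ⟨hp1, hp2, hv⟩
    · rw [if_neg hv] at h hq
      by_cases hpe : endv ≤ p + PySem.List.pyGetD board p 0
      · obtain ⟨g', rfl⟩ : ∃ g', g = g' + 1 := by
          cases g with
          | zero => simp [chainFine] at h
          | succ g' => exact ⟨g', rfl⟩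
        rw [gSpec, if_pos hpe] at hq; cases hq
      · have hbnd := pv_fine_bounds board endv _ _ h hpe
        exact ih _ q h hbnd.1 hbnd.2 hq

lemma pvG_rest (board : List Int) (endv : Int) (hend : endv = (board.length : Int) - 1)
    (hfine : ∀ k, -(board.length : Int) ≤ k → k < endv →
      chainFine board endv (pvN board) k = true)
    (p q : Int) (h1 : -(board.length : Int) ≤ p) (h2 : p < endv)
    (hq : pvG board endv p = some q) : pvRest board endv q :=
  Or.inr (pv_gspec_rest board endv hend (pvN board) p q (hfine p h1 h2) h1 h2 hq)

lemma pv_chainA_eq (board : List Int) (endv : Int) (hend : endv = (board.length : Int) - 1)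
    (hfine : ∀ k, -(board.length : Int) ≤ k → k < endv →
      chainFine board endv (pvN board) k = true)
    (pos roll : Int)
    (hsafe : roll ≠ 0 → (-(board.length : Int) ≤ pos + roll ∨ endv ≤ pos + roll)) :
    chainA board endv (pvN board + 1) pos roll =
      if roll = 0 then some pos else pvG board endv (pos + roll) := by
  by_cases h0 : roll = 0
  · simp [chainA, h0]
  · rw [if_neg h0]
    simp only [chainA, if_neg h0]
    by_cases hpe : endv ≤ pos + roll
    · rw [if_pos hpe, pvG_none board endv _ hpe]
    · rw [if_neg hpe]
      have hin : -(board.length : Int) ≤ pos + roll := by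
        rcases hsafe h0 with h | h
        · exact h
        · omega
      have hf := hfine (pos + roll) hin (by omega)
      have hL := pv_L board endv hend (pvN board) (pvN board) (pos + roll) hf le_rfl
      rw [if_neg hpe] at hL
      exact hL

lemma pv_chase_stop (board : List Int) (endv : Int) (f : Nat)
    (cache : PySem.Dict Int (Option Int)) (s : Int) (path : List Int)
    (h : ¬ (s < endv ∧ cache.contains s = false ∧ PySem.List.pyGetD board s 0 ≠ 0)) :
    chaseB board endv f cache s path = (path, s) := by
  cases f with
  | zero => rfl
  | succ f => simp only [chaseB, if_neg h]

lemma pv_chaseB_spec (board : List Int) (endv : Int)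
    (hend : endv = (board.length : Int) - 1)
    (hfine : ∀ k, -(board.length : Int) ≤ k → k < endv →
      chainFine board endv (pvN board) k = true) :
    ∀ (g f : Nat) (cache : PySem.Dict Int (Option Int)) (s : Int) (path : List Int),
      g ≤ f →
      (endv ≤ s ∨ (-(board.length : Int) ≤ s ∧ s < endv ∧ chainFine board endv g s = true)) →
      (endv ≤ (chaseB board endv f cache s path).2 ∨
        (-(board.length : Int) ≤ (chaseB board endv f cache s path).2 ∧
          (chaseB board endv f cache s path).2 < endv)) ∧
      pvG board endv (chaseB board endv f cache s path).2 = pvG board endv s ∧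
      (∀ q ∈ (chaseB board endv f cache s path).1,
        q ∈ path ∨ (-(board.length : Int) ≤ q ∧ q < endv ∧
          pvG board endv q = pvG board endv s)) ∧
      (endv ≤ (chaseB board endv f cache s path).2 ∨
       cache.contains (chaseB board endv f cache s path).2 = true ∨
       PySem.List.pyGetD board (chaseB board endv f cache s path).2 0 = 0) := by
  intro g
  induction g with
  | zero =>
    intro f cache s path _ hs
    have hse : endv ≤ s := by
      rcases hs with h | h
      · exact h
      · simp [chainFine] at h
    rw [pv_chase_stop board endv f cache s path (by intro hc; omega)]
    exact ⟨Or.inl hse, rfl, fun q hq => Or.inl hq, Or.inl hse⟩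
  | succ g ih =>
    intro f cache s path hle hs
    by_cases hC : s < endv ∧ cache.contains s = false ∧ PySem.List.pyGetD board s 0 ≠ 0
    · have hs' : -(board.length : Int) ≤ s ∧ s < endv ∧ chainFine board endv (g+1) s = true := by
        rcases hs with h | h
        · omega
        · exact h
      have hg := pv_get_some board endv hend s hs'.1 hs'.2.1
      have hf' : chainFine board endv g (s + PySem.List.pyGetD board s 0) = true := by
        have := hs'.2.2
        rw [chainFine_succ board endv g s _ (not_le.2 hs'.2.1) hg, if_neg hC.2.2] at this
        exact this
      obtain ⟨f', rfl⟩ : ∃ f', f = f' + 1 := ⟨f - 1, by omega⟩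
      have hstep : chaseB board endv (f'+1) cache s path =
          chaseB board endv f' cache (s + PySem.List.pyGetD board s 0) (path ++ [s]) := by
        simp only [chaseB, if_pos hC]
      have hGs : pvG board endv s = pvG board endv (s + PySem.List.pyGetD board s 0) := by
        rw [pvG_eq board endv hend hfine s hs'.1 hs'.2.1, if_neg hC.2.2]
      have hnext : endv ≤ s + PySem.List.pyGetD board s 0 ∨
          (-(board.length : Int) ≤ s + PySem.List.pyGetD board s 0 ∧
            s + PySem.List.pyGetD board s 0 < endv ∧
            chainFine board endv g (s + PySem.List.pyGetD board s 0) = true) := by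
        by_cases hpe : endv ≤ s + PySem.List.pyGetD board s 0
        · exact Or.inl hpe
        · have hbnd := pv_fine_bounds board endv g _ hf' hpe
          exact Or.inr ⟨hbnd.1, hbnd.2, hf'⟩
      obtain ⟨ih1, ih2, ih3, ih4⟩ := ih f' cache (s + PySem.List.pyGetD board s 0)
        (path ++ [s]) (by omega) hnext
      rw [hstep]
      refine ⟨ih1, by rw [ih2, ← hGs], ?_, ih4⟩
      intro q hq
      rcases ih3 q hq with hq' | hq'
      · rcases List.mem_append.mp hq' with h | h
        · exact Or.inl h
        · right
          have : q = s := by simpa using h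
          subst this
          exact ⟨hs'.1, hs'.2.1, rfl⟩
      · exact Or.inr ⟨hq'.1, hq'.2.1, by rw [hq'.2.2, ← hGs]⟩
    · rw [pv_chase_stop board endv f cache s path hC]
      have h1 : endv ≤ s ∨ (-(board.length : Int) ≤ s ∧ s < endv) := by
        rcases hs with h | h
        · exact Or.inl h
        · exact Or.inr ⟨h.1, h.2.1⟩
      refine ⟨h1, rfl, fun q hq => Or.inl hq, ?_⟩
      by_cases hse : endv ≤ s
      · exact Or.inl hse
      · push Not at hC
        by_cases hcc : cache.contains s = true
        · exact Or.inr (Or.inl hcc)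
        · right; right
          exact hC (by omega) (by simpa using hcc)

lemma pv_inv_foldl (board : List Int) (endv : Int) (r : Option Int) :
    ∀ (qs : List Int) (cache : PySem.Dict Int (Option Int)),
      pvInv board endv cache →
      (∀ q ∈ qs, r = pvG board endv q) →
      pvInv board endv (qs.foldl (fun c q => c.insert q r) cache) := by
  intro qs
  induction qs with
  | nil => intro cache hInv _; exact hInv
  | cons q0 qs ih =>
    intro cache hInv hq
    have hq0 : r = pvG board endv q0 := hq q0 (by simp)
    simp only [List.foldl_cons]
    apply ih
    · intro k v hget
      rw [PySem.Dict.get?_insert] at hget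
      split_ifs at hget with hk
      · cases hget
        rw [hk]
        exact hq0
      · exact hInv k v hget
    · intro q' hq'; exact hq q' (by simp [hq'])

lemma pv_resolveB_spec (board : List Int) (endv : Int)
    (hend : endv = (board.length : Int) - 1)
    (hfine : ∀ k, -(board.length : Int) ≤ k → k < endv →
      chainFine board endv (pvN board) k = true)
    (cache : PySem.Dict Int (Option Int)) (s : Int)
    (hInv : pvInv board endv cache)
    (hs : endv ≤ s ∨ (-(board.length : Int) ≤ s ∧ s < endv)) :
    (resolveB board endv cache s).1 = pvG board endv s ∧
    pvInv board endv (resolveB board endv cache s).2 := by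
  have hs' : endv ≤ s ∨ (-(board.length : Int) ≤ s ∧ s < endv ∧
      chainFine board endv (pvN board) s = true) := by
    rcases hs with h | h
    · exact Or.inl h
    · exact Or.inr ⟨h.1, h.2, hfine s h.1 h.2⟩
  obtain ⟨h1, h2, h3, h4⟩ := pv_chaseB_spec board endv hend hfine
    (pvN board) (pvN board + 1) cache s [] (by omega) hs'
  unfold resolveB
  have hr : (if endv ≤ (chaseB board endv (pvN board + 1) cache s []).2 then none
      else (cache.get? (chaseB board endv (pvN board + 1) cache s []).2).getD
        (some (chaseB board endv (pvN board + 1) cache s []).2)) = pvG board endv s := by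
    by_cases hc1 : endv ≤ (chaseB board endv (pvN board + 1) cache s []).2
    · rw [if_pos hc1, ← h2, pvG_none board endv _ hc1]
    · rw [if_neg hc1]
      have hbnd : -(board.length : Int) ≤ (chaseB board endv (pvN board + 1) cache s []).2 ∧
          (chaseB board endv (pvN board + 1) cache s []).2 < endv := by
        rcases h1 with h | h
        · omega
        · exact h
      rcases hget : cache.get? (chaseB board endv (pvN board + 1) cache s []).2 with _ | v
      · have hcont : cache.contains (chaseB board endv (pvN board + 1) cache s []).2 = false := by
          rw [PySem.Dict.contains_eq_isSome_get?, hget]; rfl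
        have hz : PySem.List.pyGetD board (chaseB board endv (pvN board + 1) cache s []).2 0 = 0 := by
          rcases h4 with h | h | h
          · omega
          · rw [hcont] at h; cases h
          · exact h
        rw [← h2, pvG_eq board endv hend hfine _ hbnd.1 hbnd.2, if_pos hz]
        rfl
      · have hv := hInv _ v hget
        simp only [Option.getD_some]
        rw [hv, h2]
  constructor
  · exact hr
  · apply pv_inv_foldl board endv _ _ _ hInv
    intro q hq
    rcases h3 q hq with h | h
    · cases h
    · rw [hr, ← h.2.2]

lemma pv_playersAB (board : List Int) (endv : Int)
    (hend : endv = (board.length : Int) - 1)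
    (hfine : ∀ k, -(board.length : Int) ≤ k → k < endv →
      chainFine board endv (pvN board) k = true) :
    ∀ (toks : List String) (start : Int) (posdA posdB : PySem.Dict Int Int)
      (cache : PySem.Dict Int (Option Int)),
      (∀ k, posdA.getD k 0 = posdB.getD k 0) →
      (∀ k, pvRest board endv (posdA.getD k 0)) →
      (∀ t ∈ toks, ∀ v, pvRest board endv v →
        (-(board.length : Int) ≤ v + pvTokInt t ∨ endv ≤ v + pvTokInt t)) →
      pvInv board endv cache →
      (∃ pl, playersA board endv (PySem.List.enumerate (toks.map pvTokInt) start) posdA = .inl pl ∧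
             playersB board endv (PySem.List.enumerate toks start) posdB cache = .inl pl) ∨
      (∃ pA pB c',
        playersA board endv (PySem.List.enumerate (toks.map pvTokInt) start) posdA = .inr pA ∧
        playersB board endv (PySem.List.enumerate toks start) posdB cache = .inr (pB, c') ∧
        (∀ k, pA.getD k 0 = pB.getD k 0) ∧ (∀ k, pvRest board endv (pA.getD k 0)) ∧
        pvInv board endv c') := by
  intro toks
  induction toks with
  | nil =>
    intro start posdA posdB cache hget hrest htok hInv
    right
    exact ⟨posdA, posdB, cache, rfl, rfl, hget, hrest, hInv⟩
  | cons t ts ih =>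
    intro start posdA posdB cache hget hrest htok hInv
    have hR : pvRest board endv (posdA.getD start 0) := hrest start
    have hsafe : pvTokInt t ≠ 0 →
        (-(board.length : Int) ≤ posdA.getD start 0 + pvTokInt t ∨
          endv ≤ posdA.getD start 0 + pvTokInt t) :=
      fun _ => htok t (by simp) _ hR
    simp only [List.map_cons, PySem.List.enumerate_cons, playersA, playersB]
    rw [pv_chainA_eq board endv hend hfine (posdA.getD start 0) (pvTokInt t) hsafe]
    by_cases h0 : pvTokInt t = 0
    · simp only [h0, reduceIte]
      have hins : ∀ k, (posdA.insert start (posdA.getD start 0)).getD k 0 = posdB.getD k 0 := by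
        intro k
        rw [PySem.Dict.getD_insert]
        split_ifs with hk
        · rw [hk]; exact hget start
        · exact hget k
      have hinsrest : ∀ k, pvRest board endv ((posdA.insert start (posdA.getD start 0)).getD k 0) := by
        intro k
        rw [PySem.Dict.getD_insert]
        split_ifs with hk
        · exact hrest start
        · exact hrest k
      exact ih (start + 1) _ posdB cache hins hinsrest
        (fun t' ht' => htok t' (by simp [ht'])) hInv
    · rw [if_neg h0]
      simp only [if_neg h0]
      have hs : endv ≤ posdA.getD start 0 + pvTokInt t ∨
          (-(board.length : Int) ≤ posdA.getD start 0 + pvTokInt t ∧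
            posdA.getD start 0 + pvTokInt t < endv) := by
        by_cases hpe : endv ≤ posdA.getD start 0 + pvTokInt t
        · exact Or.inl hpe
        · rcases hsafe h0 with h | h
          · exact Or.inr ⟨h, by omega⟩
          · omega
      have hres := pv_resolveB_spec board endv hend hfine cache
        (posdA.getD start 0 + pvTokInt t) hInv hs
      rw [← hget start]
      rcases hR2 : resolveB board endv cache (posdA.getD start 0 + pvTokInt t) with ⟨r, c'⟩
      rw [hR2] at hres
      obtain ⟨hr, hInv'⟩ := hres
      simp only at hr
      rcases hGv : pvG board endv (posdA.getD start 0 + pvTokInt t) with _ | p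
      · rw [hGv] at hr
        subst hr
        exact Or.inl ⟨start, rfl, rfl⟩
      · rw [hGv] at hr
        subst hr
        have hbnd : -(board.length : Int) ≤ posdA.getD start 0 + pvTokInt t ∧
            posdA.getD start 0 + pvTokInt t < endv := by
          rcases hs with h | h
          · rw [pvG_none board endv _ h] at hGv; cases hGv
          · exact h
        have hp : pvRest board endv p :=
          pvG_rest board endv hend hfine _ p hbnd.1 hbnd.2 hGv
        have hins : ∀ k, (posdA.insert start p).getD k 0 = (posdB.insert start p).getD k 0 := by
          intro k
          rw [PySem.Dict.getD_insert, PySem.Dict.getD_insert]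
          split_ifs with hk
          · rfl
          · exact hget k
        have hinsrest : ∀ k, pvRest board endv ((posdA.insert start p).getD k 0) := by
          intro k
          rw [PySem.Dict.getD_insert]
          split_ifs with hk
          · exact hp
          · exact hrest k
        exact ih (start + 1) _ _ c' hins hinsrest
          (fun t' ht' => htok t' (by simp [ht'])) hInv'

lemma pv_simAB (board : List Int) (endv : Int)
    (hend : endv = (board.length : Int) - 1)
    (hfine : ∀ k, -(board.length : Int) ≤ k → k < endv →
      chainFine board endv (pvN board) k = true) :
    ∀ (lines : List String) (moves : Int) (posdA posdB : PySem.Dict Int Int)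
      (cache : PySem.Dict Int (Option Int)),
      (∀ k, posdA.getD k 0 = posdB.getD k 0) →
      (∀ k, pvRest board endv (posdA.getD k 0)) →
      (∀ line ∈ lines, ∀ t ∈ PySem.Str.split₀ line, ∀ v, pvRest board endv v →
        (-(board.length : Int) ≤ v + pvTokInt t ∨ endv ≤ v + pvTokInt t)) →
      pvInv board endv cache →
      simA board endv lines moves posdA = simB board endv lines (moves - 1) posdB cache := by
  intro lines
  induction lines with
  | nil => intro _ _ _ _ _ _ _ _; rfl
  | cons line rest ih =>
    intro moves posdA posdB cache hget hrest htok hInv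
    rcases pv_playersAB board endv hend hfine (PySem.Str.split₀ line) 1 posdA posdB cache
      hget hrest (fun t ht => htok line (by simp) t ht) hInv with
      ⟨pl, hA, hB⟩ | ⟨pA, pB, c', hA, hB, h1, h2, h3⟩
    · simp only [simA, simB, hA, hB]
      congr 1; ring
    · simp only [simA, simB, hA, hB]
      have hrec := ih (moves + 1) pA pB c' h1 h2
        (fun l hl => htok l (by simp [hl])) h3
      rw [show moves + 1 - 1 = moves from by ring] at hrec
      rw [show moves - 1 + 1 = moves from by ring]
      exact hrec

lemma pv_init_getD (k : Int) :
    (PySem.Dict.ofList [((1 : Int), (0 : Int)), (2, 0)]).getD k 0 = 0 := by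
  rw [PySem.Dict.getD_eq_get?_getD]
  rcases h : (PySem.Dict.ofList [((1 : Int), (0 : Int)), (2, 0)]).get? k with _ | v
  · rfl
  · have hv := PySem.Dict.mem_items_of_get?_eq_some _ h
    have hitems : (PySem.Dict.ofList [((1 : Int), (0 : Int)), (2, 0)]).items =
        [((1 : Int), (0 : Int)), ((2 : Int), (0 : Int))] := by decide
    rw [hitems] at hv
    simp only [List.mem_cons, List.not_mem_nil, or_false] at hv
    rcases hv with hv | hv <;> simp only [Prod.ext_iff] at hv <;> exact hv.2

theorem solve_spec : Claim_equal_solve := by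
  intro data _hdom hpre
  obtain ⟨_htok, hfa, hfb⟩ := hpre
  unfold Spec_solve solve solve_alt
  have hfine : ∀ k, -((pvBoard data).length : Int) ≤ k → k < ((pvBoard data).length : Int) - 1 →
      chainFine (pvBoard data) (((pvBoard data).length : Int) - 1) (pvN (pvBoard data)) k = true := by
    intro k h1 h2
    exact hfa k (PySem.List.mem_pyRange_one.2 ⟨h1, h2⟩)
  have htok : ∀ line ∈ pvDice data, ∀ t ∈ PySem.Str.split₀ line, ∀ v,
      pvRest (pvBoard data) (((pvBoard data).length : Int) - 1) v →
      (-((pvBoard data).length : Int) ≤ v + pvTokInt t ∨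
        ((pvBoard data).length : Int) - 1 ≤ v + pvTokInt t) := by
    intro line hl t ht v hv
    have hmem : pvTokInt t ∈ pvDiceVals data := by
      unfold pvDiceVals
      rw [List.mem_flatMap]
      exact ⟨line, hl, List.mem_map.2 ⟨t, ht, rfl⟩⟩
    obtain ⟨hb1, hb2⟩ := hfb (pvTokInt t) hmem
    rcases hv with hv | hv
    · subst hv
      rcases hb1 with h | h
      · left; omega
      · right; omega
    · exact hb2 v (PySem.List.mem_pyRange_one.2 ⟨hv.1, hv.2.1⟩) hv.2.2
  have h := pv_simAB (pvBoard data) (((pvBoard data).length : Int) - 1) rfl hfine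
    (pvDice data) 1 (PySem.Dict.ofList [(1, 0), (2, 0)])
    (PySem.Dict.ofList [(1, 0), (2, 0)]) PySem.Dict.empty
    (fun k => rfl) (fun k => by rw [pv_init_getD]; exact Or.inl rfl)
    htok
    (fun k v hkv => by rw [PySem.Dict.get?_empty] at hkv; cases hkv)
  simpa using h
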